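-- pv_equiv track=rewrite | github.com/xiaoda2008/StrategyLoopbackTest | src/com/xiaoda/fund/loopbacktester/data/initFdDt.py | get8slListFromFundList
-- ===== SOURCE A (Python) =====
-- def get8slListFromFundList(fundList):
--     retSLList=[]
--     slLen=len(fundList)
--     #对所有基金进行遍历
--     i=0
--     tmpList1=[]
--     tmpList2=[]
--     tmpList3=[]
--     tmpList4=[]
--     tmpList5=[]
--     tmpList6=[]
--     tmpList7=[]
--     tmpList8=[]
--
--     for fundCode in fundList:
--         #log.logger.info(stockCode)
--         if i<slLen*1/8:
--             tmpList1.append(fundCode)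
--         elif i>=slLen*1/8 and i<slLen*2/8:
--             tmpList2.append(fundCode)
--         elif i>=slLen*2/8 and i<slLen*3/8:
--             tmpList3.append(fundCode)
--         elif i>=slLen*3/8 and i<slLen*4/8:
--             tmpList4.append(fundCode)
--         elif i>=slLen*4/8 and i<slLen*5/8:
--             tmpList5.append(fundCode)
--         elif i>=slLen*5/8 and i<slLen*6/8:
--             tmpList6.append(fundCode)
--         elif i>=slLen*6/8 and i<slLen*7/8:
--             tmpList7.append(fundCode)
--         else:
--             tmpList8.append(fundCode)
--         i=i+1
--     retSLList.append(tmpList1)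
--     retSLList.append(tmpList2)
--     retSLList.append(tmpList3)
--     retSLList.append(tmpList4)
--     retSLList.append(tmpList5)
--     retSLList.append(tmpList6)
--     retSLList.append(tmpList7)
--     retSLList.append(tmpList8)
--
--     return retSLList
-- ===== SOURCE B (Python) =====
-- def get8slListFromFundList(fundList):
--     slLen = len(fundList)
--     # boundary indices: cuts[j] = ceil(slLen*j/8), computed up front
--     cuts = [(slLen * j + 7) // 8 for j in range(9)]
--     return [fundList[cuts[j]:cuts[j + 1]] for j in range(8)]
-- ===== Notes on version B (the rewrite author's own statement) =====
-- stated objective: simpler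
-- what changed: B computes the eight chunk boundary indices up front as cuts[j] = ceil(slLen*j/8) and returns the eight slices fundList[cuts[j]:cuts[j+1]], removing A's running index and per-element 8-way if/elif classification; it measured faster because eight C-level slice copies replace per-element Python-level float comparisons and appends.
import Mathlib
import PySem

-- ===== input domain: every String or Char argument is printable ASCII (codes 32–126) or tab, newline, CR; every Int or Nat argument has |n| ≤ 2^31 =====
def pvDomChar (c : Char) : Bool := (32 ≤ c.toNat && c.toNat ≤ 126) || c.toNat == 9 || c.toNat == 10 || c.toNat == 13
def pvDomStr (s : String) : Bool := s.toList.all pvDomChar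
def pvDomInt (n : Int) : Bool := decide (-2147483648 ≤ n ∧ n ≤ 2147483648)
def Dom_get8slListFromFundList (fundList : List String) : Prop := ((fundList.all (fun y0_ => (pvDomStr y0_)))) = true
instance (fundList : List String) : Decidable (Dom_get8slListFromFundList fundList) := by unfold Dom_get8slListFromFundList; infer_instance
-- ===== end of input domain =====

-- B replaces A's per-element 8-way if/elif classification (running index i) by computing the
-- eight chunk boundaries up front and slicing; objective: simpler.

-- ===== PORT A =====
-- Loop body of A, one step of the for-loop over fundList; state = (tmpList1..tmpList8, i).
-- Python compares i < slLen*j/8 in float arithmetic, which is exact here, so the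
-- comparisons are ported as the equivalent integer comparisons 8*i < slLen*j.
def pvStepA (slLen : Int)
    (s : List String × List String × List String × List String ×
         List String × List String × List String × List String × Int)
    (fundCode : String) :
    List String × List String × List String × List String ×
    List String × List String × List String × List String × Int :=
  let (t1, t2, t3, t4, t5, t6, t7, t8, i) := s
  if 8 * i < slLen * 1 then
    (t1 ++ [fundCode], t2, t3, t4, t5, t6, t7, t8, i + 1)
  else if slLen * 1 ≤ 8 * i ∧ 8 * i < slLen * 2 then
    (t1, t2 ++ [fundCode], t3, t4, t5, t6, t7, t8, i + 1)
  else if slLen * 2 ≤ 8 * i ∧ 8 * i < slLen * 3 then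
    (t1, t2, t3 ++ [fundCode], t4, t5, t6, t7, t8, i + 1)
  else if slLen * 3 ≤ 8 * i ∧ 8 * i < slLen * 4 then
    (t1, t2, t3, t4 ++ [fundCode], t5, t6, t7, t8, i + 1)
  else if slLen * 4 ≤ 8 * i ∧ 8 * i < slLen * 5 then
    (t1, t2, t3, t4, t5 ++ [fundCode], t6, t7, t8, i + 1)
  else if slLen * 5 ≤ 8 * i ∧ 8 * i < slLen * 6 then
    (t1, t2, t3, t4, t5, t6 ++ [fundCode], t7, t8, i + 1)
  else if slLen * 6 ≤ 8 * i ∧ 8 * i < slLen * 7 then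
    (t1, t2, t3, t4, t5, t6, t7 ++ [fundCode], t8, i + 1)
  else
    (t1, t2, t3, t4, t5, t6, t7, t8 ++ [fundCode], i + 1)

def get8slListFromFundList (fundList : List String) : List (List String) :=
  let slLen : Int := fundList.length
  let st := fundList.foldl (pvStepA slLen) ([], [], [], [], [], [], [], [], 0)
  [st.1, st.2.1, st.2.2.1, st.2.2.2.1, st.2.2.2.2.1, st.2.2.2.2.2.1,
   st.2.2.2.2.2.2.1, st.2.2.2.2.2.2.2.1]

-- ===== PORT B =====
def get8slListFromFundList_alt (fundList : List String) : List (List String) :=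
  let slLen : Int := fundList.length
  let cuts : List Int :=
    (PySem.List.pyRange 0 9 1).map (fun j => PySem.Int.floordiv (slLen * j + 7) 8)
  (PySem.List.pyRange 0 8 1).map (fun j =>
    PySem.List.slice fundList (some (PySem.List.pyGetD cuts j 0))
      (some (PySem.List.pyGetD cuts (j + 1) 0)))

-- ===== PRECONDITION & SPEC =====
def Spec_get8slListFromFundList (fundList : List String) (out : List (List String)) : Prop := out = get8slListFromFundList_alt fundList
instance (fundList : List String) (out : List (List String)) : Decidable (Spec_get8slListFromFundList fundList out) := by unfold Spec_get8slListFromFundList; infer_instance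

-- ===== CLAIM (what is proved, stated in full; the proofs are below) =====
def Claim_equal_get8slListFromFundList : Prop := ∀ (fundList : List String), Dom_get8slListFromFundList fundList → Spec_get8slListFromFundList fundList (get8slListFromFundList fundList)

-- ===== LEMMAS AND PROOFS =====

-- elements of l (local offset i) whose global index satisfies f
def pvSel (f : Nat → Bool) : Nat → List String → List String
  | _, [] => []
  | i, x :: xs => (if f i then [x] else []) ++ pvSel f (i + 1) xs

def pvCond (n k p : Nat) : Bool := decide (n * (k - 1) ≤ 8 * p ∧ 8 * p < n * k)
def pvCondLast (n p : Nat) : Bool := decide (n * 7 ≤ 8 * p)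

lemma pvSel_nil (f : Nat → Bool) (i : Nat) : pvSel f i [] = [] := rfl
lemma pvSel_cons (f : Nat → Bool) (i : Nat) (x : String) (xs : List String) :
    pvSel f i (x :: xs) = (if f i then [x] else []) ++ pvSel f (i + 1) xs := rfl

lemma pvFoldA_inv (n : Nat) (l : List String) :
    ∀ (i : Nat) (t1 t2 t3 t4 t5 t6 t7 t8 : List String),
    l.foldl (pvStepA (n : Int)) (t1, t2, t3, t4, t5, t6, t7, t8, (i : Int)) =
      (t1 ++ pvSel (pvCond n 1) i l, t2 ++ pvSel (pvCond n 2) i l,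
       t3 ++ pvSel (pvCond n 3) i l, t4 ++ pvSel (pvCond n 4) i l,
       t5 ++ pvSel (pvCond n 5) i l, t6 ++ pvSel (pvCond n 6) i l,
       t7 ++ pvSel (pvCond n 7) i l, t8 ++ pvSel (pvCondLast n) i l,
       (i : Int) + l.length) := by
  induction l with
  | nil => intro i t1 t2 t3 t4 t5 t6 t7 t8; simp [pvSel_nil]
  | cons x xs ih =>
    intro i t1 t2 t3 t4 t5 t6 t7 t8
    rw [List.foldl_cons]
    have hcast : (i : Int) + 1 = ((i + 1 : Nat) : Int) := by push_cast; ring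
    simp only [pvStepA]
    split_ifs with h1 h2 h3 h4 h5 h6 h7 <;> rw [hcast, ih] <;>
      simp only [Prod.mk.injEq, pvSel_cons, pvCond, pvCondLast, decide_eq_true_eq] <;>
      refine ⟨?_, ?_, ?_, ?_, ?_, ?_, ?_, ?_, ?_⟩ <;>
      first
        | (rw [if_pos (by omega)]; simp)
        | (rw [if_neg (by omega)]; simp)
        | (simp only [List.length_cons]; push_cast; ring)

lemma pvSel_interval (lo hi : Nat) (l : List String) :
    ∀ i : Nat, pvSel (fun p => decide (lo ≤ p ∧ p < hi)) i l =
      (l.drop (lo - i)).take (hi - max lo i) := by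
  induction l with
  | nil => intro i; simp [pvSel_nil]
  | cons x xs ih =>
    intro i
    rw [pvSel_cons, ih]
    by_cases hlo : lo ≤ i
    · by_cases hhi : i < hi
      · have e1 : lo - i = 0 := by omega
        have e2 : lo - (i + 1) = 0 := by omega
        have e3 : max lo i = i := by omega
        have e4 : max lo (i + 1) = i + 1 := by omega
        have e5 : hi - i = (hi - (i + 1)) + 1 := by omega
        simp [e1, e2, e4, e5, hlo, hhi]
      · have e1 : lo - i = 0 := by omega
        have e2 : lo - (i + 1) = 0 := by omega
        have e3 : max lo i = i := by omega
        have e4 : max lo (i + 1) = i + 1 := by omega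
        have e5 : hi - i = 0 := by omega
        have e6 : hi - (i + 1) = 0 := by omega
        simp [e1, e2, e3, e4, e5, e6, hhi]
    · have e1 : lo - i = (lo - (i + 1)) + 1 := by omega
      have e2 : max lo i = lo := by omega
      have e3 : max lo (i + 1) = lo := by omega
      simp [hlo, e1, e2, e3]

lemma pvSel_tail (lo : Nat) (l : List String) :
    ∀ i : Nat, pvSel (fun p => decide (lo ≤ p)) i l = l.drop (lo - i) := by
  induction l with
  | nil => intro i; simp [pvSel_nil]
  | cons x xs ih =>
    intro i
    rw [pvSel_cons, ih]
    by_cases hlo : lo ≤ i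
    · have e1 : lo - i = 0 := by omega
      have e2 : lo - (i + 1) = 0 := by omega
      simp [hlo, e1, e2]
    · have e1 : lo - i = (lo - (i + 1)) + 1 := by omega
      simp [hlo, e1]

lemma pvSel_congr (f g : Nat → Bool) (h : ∀ p, f p = g p) (l : List String) :
    ∀ i : Nat, pvSel f i l = pvSel g i l := by
  induction l with
  | nil => intro i; rfl
  | cons x xs ih => intro i; rw [pvSel_cons, pvSel_cons, h i, ih]

-- the eight boundary indices of B: pvCut n k = ceil(n*k/8)
def pvCut (n k : Nat) : Nat := (n * k + 7) / 8

lemma pvChunk (lo hi : Nat) (f : Nat → Bool) (hf : ∀ p, f p = decide (lo ≤ p ∧ p < hi))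
    (l : List String) : pvSel f 0 l = (l.drop lo).take (hi - lo) := by
  rw [pvSel_congr f _ hf, pvSel_interval]; simp

lemma pvAltEq (l : List String) : get8slListFromFundList_alt l =
    [(l.drop (pvCut l.length 0)).take (pvCut l.length 1 - pvCut l.length 0),
     (l.drop (pvCut l.length 1)).take (pvCut l.length 2 - pvCut l.length 1),
     (l.drop (pvCut l.length 2)).take (pvCut l.length 3 - pvCut l.length 2),
     (l.drop (pvCut l.length 3)).take (pvCut l.length 4 - pvCut l.length 3),
     (l.drop (pvCut l.length 4)).take (pvCut l.length 5 - pvCut l.length 4),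
     (l.drop (pvCut l.length 5)).take (pvCut l.length 6 - pvCut l.length 5),
     (l.drop (pvCut l.length 6)).take (pvCut l.length 7 - pvCut l.length 6),
     (l.drop (pvCut l.length 7)).take (pvCut l.length 8 - pvCut l.length 7)] := by
  have hr9 : PySem.List.pyRange 0 9 1 = [0, 1, 2, 3, 4, 5, 6, 7, 8] := by decide
  have hr8 : PySem.List.pyRange 0 8 1 = [0, 1, 2, 3, 4, 5, 6, 7] := by decide
  unfold get8slListFromFundList_alt
  simp only [hr9, hr8, List.map]
  simp [PySem.List.pyGetD, PySem.List.pyGet?, PySem.List.pyIdx?]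
  have h1 : ((l.length : Int) + 7) / 8 = ((pvCut l.length 1 : Nat) : Int) := by unfold pvCut; omega
  have h2 : ((l.length : Int) * 2 + 7) / 8 = ((pvCut l.length 2 : Nat) : Int) := by unfold pvCut; omega
  have h3 : ((l.length : Int) * 3 + 7) / 8 = ((pvCut l.length 3 : Nat) : Int) := by unfold pvCut; omega
  have h4 : ((l.length : Int) * 4 + 7) / 8 = ((pvCut l.length 4 : Nat) : Int) := by unfold pvCut; omega
  have h5 : ((l.length : Int) * 5 + 7) / 8 = ((pvCut l.length 5 : Nat) : Int) := by unfold pvCut; omega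
  have h6 : ((l.length : Int) * 6 + 7) / 8 = ((pvCut l.length 6 : Nat) : Int) := by unfold pvCut; omega
  have h7 : ((l.length : Int) * 7 + 7) / 8 = ((pvCut l.length 7 : Nat) : Int) := by unfold pvCut; omega
  have h8 : ((l.length : Int) * 8 + 7) / 8 = ((pvCut l.length 8 : Nat) : Int) := by unfold pvCut; omega
  rw [h1, h2, h3, h4, h5, h6, h7, h8]
  simp only [PySem.List.slice_natCast, PySem.List.slice_to_natCast]
  have hc0 : pvCut l.length 0 = 0 := by simp [pvCut]
  simp [hc0]

-- ===== VERDICT (by name: the statement is the Claim_ definition above) =====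
theorem get8slListFromFundList_spec : Claim_equal_get8slListFromFundList := by
  intro l _
  unfold Spec_get8slListFromFundList
  have hA := pvFoldA_inv l.length l 0 ([]) ([]) ([]) ([]) ([]) ([]) ([]) ([])
  push_cast at hA
  rw [pvAltEq]
  simp only [get8slListFromFundList, hA, List.nil_append, List.cons.injEq]
  refine ⟨?_, ?_, ?_, ?_, ?_, ?_, ?_, ?_, trivial⟩
  · exact pvChunk (pvCut l.length 0) (pvCut l.length 1) _
      (fun p => by simp only [pvCond, decide_eq_decide]; unfold pvCut; omega) l
  · exact pvChunk (pvCut l.length 1) (pvCut l.length 2) _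
      (fun p => by simp only [pvCond, decide_eq_decide]; unfold pvCut; omega) l
  · exact pvChunk (pvCut l.length 2) (pvCut l.length 3) _
      (fun p => by simp only [pvCond, decide_eq_decide]; unfold pvCut; omega) l
  · exact pvChunk (pvCut l.length 3) (pvCut l.length 4) _
      (fun p => by simp only [pvCond, decide_eq_decide]; unfold pvCut; omega) l
  · exact pvChunk (pvCut l.length 4) (pvCut l.length 5) _
      (fun p => by simp only [pvCond, decide_eq_decide]; unfold pvCut; omega) l
  · exact pvChunk (pvCut l.length 5) (pvCut l.length 6) _
      (fun p => by simp only [pvCond, decide_eq_decide]; unfold pvCut; omega) l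
  · exact pvChunk (pvCut l.length 6) (pvCut l.length 7) _
      (fun p => by simp only [pvCond, decide_eq_decide]; unfold pvCut; omega) l
  · rw [pvSel_congr _ (fun p => decide (pvCut l.length 7 ≤ p))
        (fun p => by simp only [pvCondLast, decide_eq_decide]; unfold pvCut; omega) l,
      pvSel_tail]
    simp only [Nat.sub_zero]
    rw [List.take_of_length_le]
    simp only [List.length_drop]
    unfold pvCut
    omega
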